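-- pv_equiv track=rewrite | github.com/GeeIHadAGoodTime/Agent-Xray | src/agent_xray/surface.py | format_tree_text
-- ===== SOURCE A (Python) =====
-- def format_tree_text(tree: dict[str, dict[str, list[str]]]) -> str:
--     """Render a day/site/task tree as plain text."""
--     lines = ["TASK TREE"]
--     for day, sites in tree.items():
--         lines.append(day)
--         for site, task_ids in sites.items():
--             lines.append(f"  {site}")
--             for task_id in task_ids:
--                 lines.append(f"    {task_id}")
--     return "\n".join(lines)
-- ===== SOURCE B (Python) =====
-- def format_tree_text(tree: dict[str, dict[str, list[str]]]) -> str: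
--     """Render a day/site/task tree as plain text (recursive descent over the nesting)."""
--     lines = ["TASK TREE"]
--
--     def render(node, depth):
--         if isinstance(node, dict):
--             for key, value in node.items():
--                 lines.append("  " * depth + key)
--                 render(value, depth + 1)
--         else:
--             for item in node:
--                 lines.append("  " * depth + item)
--
--     render(tree, 0)
--     return "\n".join(lines)
-- ===== Notes on version B (the rewrite author's own statement) =====
-- stated objective: alternative
-- what changed: Replaces the three hard-coded stacked loops with a single recursive render(node, depth) helper that walks the nesting and indents by ' '*depth, so the tree shape, not the code, determines the levels.
import Mathlib
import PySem

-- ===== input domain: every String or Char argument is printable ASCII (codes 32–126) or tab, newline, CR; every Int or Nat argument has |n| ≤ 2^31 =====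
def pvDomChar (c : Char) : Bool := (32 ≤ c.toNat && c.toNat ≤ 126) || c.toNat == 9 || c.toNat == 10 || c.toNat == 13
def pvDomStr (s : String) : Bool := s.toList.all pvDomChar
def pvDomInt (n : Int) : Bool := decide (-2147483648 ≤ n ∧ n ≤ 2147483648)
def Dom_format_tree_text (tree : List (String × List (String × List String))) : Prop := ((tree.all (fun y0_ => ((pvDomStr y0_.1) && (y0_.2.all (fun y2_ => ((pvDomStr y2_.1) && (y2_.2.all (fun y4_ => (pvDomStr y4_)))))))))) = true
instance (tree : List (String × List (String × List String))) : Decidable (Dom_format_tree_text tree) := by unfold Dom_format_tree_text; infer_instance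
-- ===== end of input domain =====

-- B replaces A's three hard-coded stacked loops with one recursive render(node, depth)
-- helper indenting by "  " * depth; same output, different decomposition (objective: alternative).

-- ===== PORT A =====
def format_tree_text (tree : List (String × List (String × List String))) : String :=
  let lines : List String :=
    tree.foldl (fun lines dayS =>
      let lines := lines ++ [dayS.1]
      dayS.2.foldl (fun lines siteT =>
        let lines := lines ++ ["  " ++ siteT.1]
        siteT.2.foldl (fun lines tid => lines ++ ["    " ++ tid]) lines) lines)
      ["TASK TREE"]
  PySem.Str.join "\n" lines

-- ===== PORT B =====
-- "  " * depth
def pvIndent (depth : Nat) : String := String.join (List.replicate depth "  ")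

-- render on the innermost list level (the non-dict branch of render)
def pvRenderTasks (depth : Nat) (node : List String) (lines : List String) : List String :=
  node.foldl (fun lines item => lines ++ [pvIndent depth ++ item]) lines

-- render on the inner dict level
def pvRenderSites (depth : Nat) (node : List (String × List String)) (lines : List String) : List String :=
  node.foldl (fun lines kv => pvRenderTasks (depth + 1) kv.2 (lines ++ [pvIndent depth ++ kv.1])) lines

-- render on the outer dict level
def pvRenderDays (depth : Nat) (node : List (String × List (String × List String))) (lines : List String) : List String :=
  node.foldl (fun lines kv => pvRenderSites (depth + 1) kv.2 (lines ++ [pvIndent depth ++ kv.1])) lines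

def format_tree_text_alt (tree : List (String × List (String × List String))) : String :=
  PySem.Str.join "\n" (pvRenderDays 0 tree ["TASK TREE"])

-- ===== PRECONDITION & SPEC =====
def Spec_format_tree_text (tree : List (String × List (String × List String))) (out : String) : Prop := out = format_tree_text_alt tree
instance (tree : List (String × List (String × List String))) (out : String) : Decidable (Spec_format_tree_text tree out) := by unfold Spec_format_tree_text; infer_instance

-- ===== CLAIM (what is proved, stated in full; the proofs are below) =====
def Claim_equal_format_tree_text : Prop := ∀ (tree : List (String × List (String × List String))), Dom_format_tree_text tree → Spec_format_tree_text tree (format_tree_text tree)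

-- ===== LEMMAS AND PROOFS =====
theorem pvIndent_zero : pvIndent 0 = "" := rfl
theorem pvIndent_one : pvIndent 1 = "  " := rfl
theorem pvIndent_two : pvIndent 2 = "    " := rfl

theorem pvRenderTasks_two (node : List String) (lines : List String) :
    pvRenderTasks 2 node lines = node.foldl (fun lines tid => lines ++ ["    " ++ tid]) lines := by
  simp [pvRenderTasks, pvIndent_two]

theorem pvRenderSites_one (node : List (String × List String)) (lines : List String) :
    pvRenderSites 1 node lines =
      node.foldl (fun lines siteT =>
        let lines := lines ++ ["  " ++ siteT.1]
        siteT.2.foldl (fun lines tid => lines ++ ["    " ++ tid]) lines) lines := by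
  simp [pvRenderSites, pvIndent_one, pvRenderTasks_two]

theorem pvRenderDays_zero (node : List (String × List (String × List String))) (lines : List String) :
    pvRenderDays 0 node lines =
      node.foldl (fun lines dayS =>
        let lines := lines ++ [dayS.1]
        dayS.2.foldl (fun lines siteT =>
          let lines := lines ++ ["  " ++ siteT.1]
          siteT.2.foldl (fun lines tid => lines ++ ["    " ++ tid]) lines) lines) lines := by
  simp [pvRenderDays, pvIndent_zero, pvRenderSites_one]

-- ===== VERDICT (by name: the statement is the Claim_ definition above) =====
theorem format_tree_text_spec : Claim_equal_format_tree_text := by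
  intro tree _
  unfold Spec_format_tree_text format_tree_text format_tree_text_alt
  rw [pvRenderDays_zero]
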